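-- pv_equiv track=rewrite | github.com/xu1718191411/AT_CODE_BEGINNER_SELECTION | CONTEXT_148/double_factorial.py | calculate
-- ===== SOURCE A (Python) =====
-- def calculate(n):
--     if n % 2 == 1:
--         return 0
--
--     s1 = n // 10
--
--     index = 1
--
--     s2 = 0
--     while (5 ** index) <= s1:
--         s2 += (s1 // (5 ** index))
--         index += 1
--
--     return s1 + s2
-- ===== SOURCE B (Python) =====
-- def calculate(n):
--     if n % 2 == 1:
--         return 0
--     s1 = n // 10
--     d = 0
--     m = s1
--     while m > 0:
--         d += m % 5
--         m //= 5
--     return s1 + (s1 - d) // 4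
-- ===== Notes on version B (the rewrite author's own statement) =====
-- stated objective: alternative
-- what changed: Replaces A's loop summing s1 // 5^i over successive powers of 5 by a single base-5 digit-sum pass and Legendre's closed form s1 + (s1 - digitsum5(s1)) // 4; Pre_ excludes negative even n, outside the natural domain of this double-factorial count, where A never enters its power loop and its value s1 = n//10 is an accidental artefact.
-- outside the precondition, e.g. on calculate(-20): A returns -2, B returns -3
import Mathlib
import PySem

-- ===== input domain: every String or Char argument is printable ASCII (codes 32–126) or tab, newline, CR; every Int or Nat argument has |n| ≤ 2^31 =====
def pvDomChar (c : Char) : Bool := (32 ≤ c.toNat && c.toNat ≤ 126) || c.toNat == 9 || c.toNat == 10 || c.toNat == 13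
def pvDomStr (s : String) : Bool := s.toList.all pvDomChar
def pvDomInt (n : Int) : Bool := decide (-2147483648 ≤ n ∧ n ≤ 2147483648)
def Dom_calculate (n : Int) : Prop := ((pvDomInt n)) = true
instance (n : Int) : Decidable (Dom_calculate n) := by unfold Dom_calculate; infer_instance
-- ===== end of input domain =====

-- B replaces A's loop over successive powers of 5 by one base-5 digit-sum pass and
-- Legendre's closed form s1 + (s1 - digitsum5 s1)/4 (alternative decomposition, same cost class).

-- ===== PORT A =====
-- A's while loop: s2 accumulates s1 // 5^index while 5^index <= s1.
def calcLoopA (s1 : Int) (index : Nat) (s2 : Int) : Int :=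
  if _h : (5:Int) ^ index ≤ s1 then
    calcLoopA s1 (index + 1) (s2 + PySem.Int.floordiv s1 ((5:Int) ^ index))
  else s2
termination_by s1.toNat + 1 - index
decreasing_by
  have hp : (index : Int) < (5:Int) ^ index := by
    induction index with
    | zero => norm_num
    | succ k ih =>
      have : (5:Int) ^ k ≥ 1 := one_le_pow₀ (by norm_num)
      push_cast
      calc ((k:Int) + 1) < (5:Int)^k + 1 := by omega
        _ ≤ (5:Int)^(k+1) := by rw [pow_succ]; nlinarith
  have : (index : Int) < s1 := lt_of_lt_of_le hp _h
  omega

def calculate (n : Int) : Int :=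
  if PySem.Int.mod n 2 = 1 then 0
  else
    let s1 := PySem.Int.floordiv n 10
    calculate.go s1
where go (s1 : Int) : Int := s1 + calcLoopA s1 1 0

-- ===== PORT B =====
-- B's while loop: d accumulates base-5 digits of m while m > 0.
def digitLoopB (m : Int) (d : Int) : Int :=
  if _h : m > 0 then
    digitLoopB (PySem.Int.floordiv m 5) (d + PySem.Int.mod m 5)
  else d
termination_by m.toNat
decreasing_by
  have h5 : PySem.Int.floordiv m 5 = m / 5 := PySem.Int.floordiv_eq_ediv_of_pos (by norm_num)
  rw [h5]
  omega

def calculate_alt (n : Int) : Int :=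
  if PySem.Int.mod n 2 = 1 then 0
  else
    let s1 := PySem.Int.floordiv n 10
    let d := digitLoopB s1 0
    s1 + PySem.Int.floordiv (s1 - d) 4

-- ===== PRECONDITION & SPEC =====
-- Pre_ excludes negative even n, outside the natural domain of this double-factorial count:
-- there A's power loop never runs and its value s1 = n//10 is an accidental artefact.
def Pre_calculate (n : Int) : Prop := 0 ≤ n ∨ PySem.Int.mod n 2 = 1
instance (n : Int) : Decidable (Pre_calculate n) := by unfold Pre_calculate; infer_instance
def pvWitness_calculate : Int := 100

def Spec_calculate (n : Int) (out : Int) : Prop := out = calculate_alt n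
instance (n : Int) (out : Int) : Decidable (Spec_calculate n out) := by unfold Spec_calculate; infer_instance

-- ===== CLAIM (what is proved, stated in full; the proofs are below) =====
def Claim_equal_calculate : Prop := ∀ (n : Int), Dom_calculate n → Pre_calculate n → Spec_calculate n (calculate n)

-- ===== LEMMAS AND PROOFS =====

theorem lt_pow5 (j : Nat) : (j : Int) < 5 ^ j := by
  induction j with
  | zero => norm_num
  | succ i ih =>
    have h1 : (1:Int) ≤ 5 ^ i := one_le_pow₀ (by norm_num)
    push_cast at ih ⊢
    rw [pow_succ]
    nlinarith

theorem calcLoopA_stop (s1 : Int) (index : Nat) (s2 : Int) (h : ¬ (5:Int) ^ index ≤ s1) :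
    calcLoopA s1 index s2 = s2 := by
  rw [calcLoopA]
  simp only [dif_neg h]

theorem calcLoopA_step (s1 : Int) (index : Nat) (s2 : Int) (h : (5:Int) ^ index ≤ s1) :
    calcLoopA s1 index s2 = calcLoopA s1 (index + 1) (s2 + PySem.Int.floordiv s1 ((5:Int) ^ index)) := by
  conv_lhs => rw [calcLoopA]
  simp only [dif_pos h]

theorem digitLoopB_stop (m d : Int) (h : ¬ m > 0) : digitLoopB m d = d := by
  rw [digitLoopB]
  simp only [dif_neg h]

theorem digitLoopB_step (m d : Int) (h : m > 0) :
    digitLoopB m d = digitLoopB (PySem.Int.floordiv m 5) (d + PySem.Int.mod m 5) := by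
  conv_lhs => rw [digitLoopB]
  simp only [dif_pos h]

-- accumulator of A's loop is additive
theorem calcLoopA_acc_k (k : Nat) : ∀ (s1 : Int) (index : Nat) (s2 : Int),
    s1.toNat + 1 - index ≤ k → calcLoopA s1 index s2 = s2 + calcLoopA s1 index 0 := by
  induction k with
  | zero =>
    intro s1 index s2 hk
    have hcond : ¬ (5:Int) ^ index ≤ s1 := by
      intro h
      have := lt_pow5 index
      omega
    rw [calcLoopA_stop _ _ _ hcond, calcLoopA_stop _ _ _ hcond]
    ring
  | succ k ih =>
    intro s1 index s2 hk
    by_cases hcond : (5:Int) ^ index ≤ s1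
    · have hk' : s1.toNat + 1 - (index + 1) ≤ k := by omega
      rw [calcLoopA_step _ _ _ hcond, calcLoopA_step _ _ _ hcond,
          ih s1 (index+1) (s2 + PySem.Int.floordiv s1 ((5:Int)^index)) hk',
          ih s1 (index+1) (0 + PySem.Int.floordiv s1 ((5:Int)^index)) hk']
      ring
    · rw [calcLoopA_stop _ _ _ hcond, calcLoopA_stop _ _ _ hcond]
      ring

theorem calcLoopA_acc (s1 : Int) (index : Nat) (s2 : Int) :
    calcLoopA s1 index s2 = s2 + calcLoopA s1 index 0 :=
  calcLoopA_acc_k _ s1 index s2 le_rfl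

-- accumulator of B's loop is additive
theorem digitLoopB_acc_k (k : Nat) : ∀ (m d : Int), m.toNat ≤ k →
    digitLoopB m d = d + digitLoopB m 0 := by
  induction k with
  | zero =>
    intro m d hk
    have h : ¬ m > 0 := by omega
    rw [digitLoopB_stop _ _ h, digitLoopB_stop _ _ h]
    ring
  | succ k ih =>
    intro m d hk
    by_cases h : m > 0
    · have h5 : PySem.Int.floordiv m 5 = m / 5 := PySem.Int.floordiv_eq_ediv_of_pos (by norm_num)
      have hk' : (PySem.Int.floordiv m 5).toNat ≤ k := by rw [h5]; omega
      rw [digitLoopB_step _ _ h, digitLoopB_step _ _ h,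
          ih _ (d + PySem.Int.mod m 5) hk', ih _ (0 + PySem.Int.mod m 5) hk']
      ring
    · rw [digitLoopB_stop _ _ h, digitLoopB_stop _ _ h]
      ring

theorem digitLoopB_acc (m d : Int) : digitLoopB m d = d + digitLoopB m 0 :=
  digitLoopB_acc_k _ m d le_rfl

-- shift lemma: loop from index on s equals loop from index-1 on s/5 (s ≥ 0, index ≥ 1)
theorem calcLoopA_shift_k (k : Nat) : ∀ (s : Int) (index : Nat), 0 ≤ s → 1 ≤ index →
    s.toNat + 1 - index ≤ k → calcLoopA s index 0 = calcLoopA (s / 5) (index - 1) 0 := by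
  induction k with
  | zero =>
    intro s index hs hi hk
    have h1 : ¬ (5:Int) ^ index ≤ s := by
      intro h
      have := lt_pow5 index
      omega
    have h2 : ¬ (5:Int) ^ (index - 1) ≤ s / 5 := by
      intro h
      have hp := lt_pow5 (index - 1)
      have hc : ((index - 1 : Nat) : Int) = (index : Int) - 1 := by
        push_cast [hi]; ring
      rw [hc] at hp
      omega
    rw [calcLoopA_stop _ _ _ h1, calcLoopA_stop _ _ _ h2]
  | succ k ih =>
    intro s index hs hi hk
    have hiff : (5:Int) ^ index ≤ s ↔ (5:Int) ^ (index - 1) ≤ s / 5 := by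
      rw [Int.le_ediv_iff_mul_le (by norm_num)]
      constructor
      · intro h
        calc (5:Int)^(index-1) * 5 = 5 ^ index := by rw [← pow_succ]; congr 1; omega
          _ ≤ s := h
      · intro h
        have he : (5:Int) ^ index = 5 ^ (index - 1) * 5 := by rw [← pow_succ]; congr 1; omega
        rw [he]; exact h
    by_cases hcond : (5:Int) ^ index ≤ s
    · rw [calcLoopA_step _ _ _ hcond, calcLoopA_step _ _ _ (hiff.mp hcond),
          calcLoopA_acc, calcLoopA_acc (s/5)]
      have hq : PySem.Int.floordiv s ((5:Int)^index) = PySem.Int.floordiv (s/5) ((5:Int)^(index-1)) := by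
        rw [PySem.Int.floordiv_eq_ediv_of_pos (pow_pos (by norm_num) index),
            PySem.Int.floordiv_eq_ediv_of_pos (pow_pos (by norm_num) _),
            Int.ediv_ediv_of_nonneg (by norm_num)]
        congr 1
        rw [mul_comm, ← pow_succ]
        congr 1
        omega
      rw [hq, ih s (index+1) hs (by omega) (by omega)]
      have he : index + 1 - 1 = (index - 1) + 1 := by omega
      rw [he]
    · rw [calcLoopA_stop _ _ _ hcond, calcLoopA_stop _ _ _ (fun h => hcond (hiff.mpr h))]

theorem calcLoopA_shift (s : Int) (hs : 0 ≤ s) (index : Nat) (hi : 1 ≤ index) :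
    calcLoopA s index 0 = calcLoopA (s / 5) (index - 1) 0 :=
  calcLoopA_shift_k _ s index hs hi le_rfl

-- Legendre: 4 * (loop from index 1) = s - digitsum, for s ≥ 0
theorem legendre (s : Int) (hs : 0 ≤ s) :
    4 * calcLoopA s 1 0 = s - digitLoopB s 0 := by
  by_cases h0 : s = 0
  · subst h0
    rw [calcLoopA_stop _ _ _ (by norm_num), digitLoopB_stop _ _ (by norm_num)]
    norm_num
  have hspos : 0 < s := lt_of_le_of_ne hs (Ne.symm h0)
  have hlt : (s / 5).toNat < s.toNat := by omega
  have ih := legendre (s / 5) (Int.ediv_nonneg hs (by norm_num))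
  have hA : calcLoopA s 1 0 = s / 5 + calcLoopA (s / 5) 1 0 := by
    by_cases h5 : (5:Int) ≤ s
    · rw [calcLoopA_step _ _ _ (by simpa using h5), calcLoopA_acc, pow_one,
          PySem.Int.floordiv_eq_ediv_of_pos (show (0:Int) < 5 by norm_num),
          calcLoopA_shift s hs 2 (by norm_num)]
      norm_num
    · have hdiv : s / 5 = 0 := by omega
      rw [hdiv, calcLoopA_stop _ _ _ (by simpa using h5),
          calcLoopA_stop _ _ _ (by norm_num)]
      norm_num
  have hB : digitLoopB s 0 = s % 5 + digitLoopB (s / 5) 0 := by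
    rw [digitLoopB_step _ _ hspos, digitLoopB_acc,
        PySem.Int.floordiv_eq_ediv_of_pos (show (0:Int) < 5 by norm_num),
        PySem.Int.mod_eq_emod_of_pos (show (0:Int) < 5 by norm_num)]
    ring
  rw [hA, hB]
  omega
termination_by s.toNat

theorem go_eq_alt (s1 : Int) (hs : 0 ≤ s1) :
    calculate.go s1 = s1 + PySem.Int.floordiv (s1 - digitLoopB s1 0) 4 := by
  have hleg := legendre s1 hs
  unfold calculate.go
  have heq : s1 - digitLoopB s1 0 = 4 * calcLoopA s1 1 0 := by omega
  rw [heq, PySem.Int.floordiv_eq_ediv_of_pos (show (0:Int) < 4 by norm_num),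
      Int.mul_ediv_cancel_left _ (by norm_num)]

-- ===== VERDICT (by name: the statement is the Claim_ definition above) =====
theorem calculate_spec : Claim_equal_calculate := by
  intro n _ hpre
  unfold Spec_calculate
  rw [calculate, calculate_alt]
  by_cases hodd : PySem.Int.mod n 2 = 1
  · rw [if_pos hodd, if_pos hodd]
  · rw [if_neg hodd, if_neg hodd]
    have hn : 0 ≤ n := hpre.resolve_right hodd
    have hs : 0 ≤ PySem.Int.floordiv n 10 := by
      rw [PySem.Int.floordiv_eq_ediv_of_pos (show (0:Int) < 10 by norm_num)]
      exact Int.ediv_nonneg hn (by norm_num)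
    exact go_eq_alt _ hs
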